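-- pv_equiv track=rewrite | github.com/theboatswain/boatswain_updater | boatswain_updater/utils/permission_utils.py | quoteAppleScript
-- ===== SOURCE A (Python) =====
-- def quoteAppleScript(string):
--     char_map = {
--         "\n": "\\n",
--         "\r": "\\r",
--         "\t": "\\t",
--         "\"": "\\\"",
--         "\\": "\\\\",
--     }
--     return '"%s"' % "".join(char_map.get(char, char) for char in string)
-- ===== SOURCE B (Python) =====
-- def quoteAppleScript(string):
--     escaped = (string.replace("\\", "\\\\")
--                      .replace("\"", "\\\"")
--                      .replace("\n", "\\n")
--                      .replace("\r", "\\r")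
--                      .replace("\t", "\\t"))
--     return '"%s"' % escaped
-- ===== Notes on version B (the rewrite author's own statement) =====
-- stated objective: faster
-- what changed: Replaced the per-character dict-lookup join with a chain of str.replace passes (backslash first so later-introduced escape backslashes are not re-doubled), each a full-string substring replacement.
import Mathlib
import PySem

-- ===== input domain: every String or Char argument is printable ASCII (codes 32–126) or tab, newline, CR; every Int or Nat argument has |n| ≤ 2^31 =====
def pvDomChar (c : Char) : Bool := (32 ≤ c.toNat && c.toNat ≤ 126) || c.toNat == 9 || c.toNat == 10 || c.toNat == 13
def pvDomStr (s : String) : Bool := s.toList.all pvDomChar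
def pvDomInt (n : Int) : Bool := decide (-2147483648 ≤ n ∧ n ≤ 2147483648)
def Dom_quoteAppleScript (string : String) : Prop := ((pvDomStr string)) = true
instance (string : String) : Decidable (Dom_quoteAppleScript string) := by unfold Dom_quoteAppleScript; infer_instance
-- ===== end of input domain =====

-- B replaces A's per-character dict-lookup join with a chain of str.replace passes (backslash first); same return value.

-- ===== PORT A =====
-- char_map = {"\n": "\\n", "\r": "\\r", "\t": "\\t", "\"": "\\\"", "\\": "\\\\"}
def pvCharMap : PySem.Dict Char String :=
  PySem.Dict.ofList [('\n', "\\n"), ('\r', "\\r"), ('\t', "\\t"), ('"', "\\\""), ('\\', "\\\\")]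

-- '"%s"' % "".join(char_map.get(char, char) for char in string)
def quoteAppleScript (string : String) : String :=
  String.ofList ('"' ::
    (PySem.Chars.join []
      (string.toList.map (fun char => (pvCharMap.getD char (String.ofList [char])).toList))) ++ ['"'])

-- ===== PORT B =====
-- chained str.replace passes, backslash first; then '"%s"' % escaped
def quoteAppleScript_alt (string : String) : String :=
  let escaped :=
    PySem.Str.replace
      (PySem.Str.replace
        (PySem.Str.replace
          (PySem.Str.replace
            (PySem.Str.replace string "\\" "\\\\")
            "\"" "\\\"")
          "\n" "\\n")
        "\r" "\\r")
      "\t" "\\t"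
  String.ofList ('"' :: escaped.toList ++ ['"'])

-- ===== PRECONDITION & SPEC =====
def Spec_quoteAppleScript (string : String) (out : String) : Prop := out = quoteAppleScript_alt string
instance (string : String) (out : String) : Decidable (Spec_quoteAppleScript string out) := by unfold Spec_quoteAppleScript; infer_instance

-- ===== CLAIM (what is proved, stated in full; the proofs are below) =====
def Claim_equal_quoteAppleScript : Prop := ∀ (string : String), Dom_quoteAppleScript string → Spec_quoteAppleScript string (quoteAppleScript string)

-- ===== LEMMAS AND PROOFS =====

-- the per-character escape functions behind each single-character replace pass
def pvFb (y : Char) : List Char := if y = '\\' then ['\\', '\\'] else [y]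
def pvFq (y : Char) : List Char := if y = '"' then ['\\', '"'] else [y]
def pvFn (y : Char) : List Char := if y = '\n' then ['\\', 'n'] else [y]
def pvFr (y : Char) : List Char := if y = '\r' then ['\\', 'r'] else [y]
def pvFt (y : Char) : List Char := if y = '\t' then ['\\', 't'] else [y]

theorem go_single (c : Char) (new : List Char) :
    ∀ (fuel : Nat) (l acc : List Char), l.length ≤ fuel →
      PySem.Chars.replace.go [c] new fuel l acc
        = acc.reverse ++ l.flatMap (fun x => if x = c then new else [x]) := by
  intro fuel
  induction fuel with
  | zero =>
    intro l acc h
    have : l = [] := List.eq_nil_of_length_eq_zero (Nat.le_zero.mp h)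
    subst this; simp [PySem.Chars.replace.go.eq_def]
  | succ n ih =>
    intro l acc h
    cases l with
    | nil => simp [PySem.Chars.replace.go.eq_def]
    | cons x t =>
      rw [PySem.Chars.replace.go.eq_def]
      simp only [List.isPrefixOf, List.length_cons] at *
      by_cases hx : c = x
      · subst hx
        simp only [BEq.rfl, Bool.true_and, if_true]
        rw [ih _ (new.reverse ++ acc) (by simp; omega)]
        simp
      · rw [if_neg (by simp; exact fun h => absurd h hx)]
        rw [ih t (x :: acc) (by omega)]
        simp [Ne.symm hx]

-- single-character substring replacement is a flatMap over the characters
theorem replace_single_char (c : Char) (new : List Char) (s : List Char) :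
    PySem.Chars.replace s [c] new = s.flatMap (fun x => if x = c then new else [x]) := by
  rw [PySem.Chars.replace]
  simp only [List.isEmpty]
  simpa using go_single c new s.length s [] le_rfl

-- join with empty separator is flatten
theorem join_empty (xss : List (List Char)) :
    PySem.Chars.join [] xss = xss.flatMap id := by
  induction xss with
  | nil => simp [PySem.Chars.join, List.intercalate]
  | cons h t ih =>
    cases t with
    | nil => simp [PySem.Chars.join, List.intercalate, List.intersperse]
    | cons h2 t2 =>
      simp only [PySem.Chars.join, List.intercalate, List.intersperse] at *
      simp [ih]

-- the five replace passes, composed pointwise, coincide with A's dict lookup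
theorem escape_pointwise (x : Char) :
    ((((pvFb x).flatMap pvFq).flatMap pvFn).flatMap pvFr).flatMap pvFt
      = (pvCharMap.getD x (String.ofList [x])).toList := by
  by_cases h5 : x = '\\'; · subst h5; decide
  by_cases h4 : x = '"'; · subst h4; decide
  by_cases h1 : x = '\n'; · subst h1; decide
  by_cases h2 : x = '\r'; · subst h2; decide
  by_cases h3 : x = '\t'; · subst h3; decide
  have hm : pvCharMap = PySem.Dict.mk
      [('\n', "\\n"), ('\r', "\\r"), ('\t', "\\t"), ('"', "\\\""), ('\\', "\\\\")] := rfl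
  simp [pvFb, pvFq, pvFn, pvFr, pvFt, h1, h2, h3, h4, h5,
    hm, PySem.Dict.getD_eq_get?_getD, beq_iff_eq,
    Ne.symm h1, Ne.symm h2, Ne.symm h3, Ne.symm h4, Ne.symm h5, PySem.Dict.get?]

-- ===== VERDICT (by name: the statement is the Claim_ definition above) =====
theorem quoteAppleScript_spec : Claim_equal_quoteAppleScript := by
  intro s _
  unfold Spec_quoteAppleScript quoteAppleScript quoteAppleScript_alt
  have e1 : ("\\" : String).toList = ['\\'] := rfl
  have e2 : ("\"" : String).toList = ['"'] := rfl
  have e3 : ("\n" : String).toList = ['\n'] := rfl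
  have e4 : ("\r" : String).toList = ['\r'] := rfl
  have e5 : ("\t" : String).toList = ['\t'] := rfl
  have eb : ("\\\\" : String).toList = ['\\', '\\'] := rfl
  have eq' : ("\\\"" : String).toList = ['\\', '"'] := rfl
  have en : ("\\n" : String).toList = ['\\', 'n'] := rfl
  have er : ("\\r" : String).toList = ['\\', 'r'] := rfl
  have et : ("\\t" : String).toList = ['\\', 't'] := rfl
  simp only [PySem.Str.toList_replace, e1, e2, e3, e4, e5, eb, eq', en, er, et,
    replace_single_char]
  refine congrArg String.ofList (congrArg (fun l => '"' :: l ++ ['"']) ?_)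
  rw [join_empty]
  have hchain :
      ((((s.toList.flatMap pvFb).flatMap pvFq).flatMap pvFn).flatMap pvFr).flatMap pvFt
        = s.toList.flatMap
            (fun x => ((((pvFb x).flatMap pvFq).flatMap pvFn).flatMap pvFr).flatMap pvFt) := by
    simp [List.flatMap_assoc]
  calc List.flatMap id (s.toList.map (fun char => (pvCharMap.getD char (String.ofList [char])).toList))
      = s.toList.flatMap (fun char => (pvCharMap.getD char (String.ofList [char])).toList) := by
        simp [List.flatMap_def]
    _ = s.toList.flatMap
          (fun x => ((((pvFb x).flatMap pvFq).flatMap pvFn).flatMap pvFr).flatMap pvFt) := by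
        refine List.flatMap_congr ?_; intro x _; exact (escape_pointwise x).symm
    _ = ((((s.toList.flatMap pvFb).flatMap pvFq).flatMap pvFn).flatMap pvFr).flatMap pvFt :=
        hchain.symm
    _ = _ := rfl
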